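-- pv_equiv track=rewrite | github.com/PaulArthurMiller/shakespeare_poet | src/shpoet/features/phonetics.py | compute_rhyme_class
-- ===== SOURCE A (Python) =====
-- from typing import Any, Dict, List, Optional
--
-- def compute_rhyme_class(phonemes: List[str]) -> str:
--     """Compute rhyme class from phonemes.
--
--     The rhyme class is the last stressed vowel plus all following phonemes.
--     Words with the same rhyme class rhyme with each other.
--
--     Args:
--         phonemes: List of CMU phonemes
--
--     Returns:
--         str: Rhyme class string (empty if cannot be computed)
--     """
--     if not phonemes:
--         return ""
--
--     # Find the last stressed vowel (primary stress = 1)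
--     last_stressed_idx = -1
--     for i, phoneme in enumerate(phonemes):
--         if "1" in phoneme or "2" in phoneme:
--             last_stressed_idx = i
--
--     if last_stressed_idx < 0:
--         # No stress found, use last vowel
--         for i, phoneme in enumerate(phonemes):
--             if any(c.isdigit() for c in phoneme):
--                 last_stressed_idx = i
--
--     if last_stressed_idx < 0:
--         return ""
--
--     # Rhyme class is from last stressed vowel to end
--     rhyme_phones = phonemes[last_stressed_idx:]
--
--     # Remove stress markers for comparison
--     normalized = []
--     for p in rhyme_phones:
--         clean = "".join(c for c in p if not c.isdigit())
--         normalized.append(clean)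
--
--     return "_".join(normalized)
-- ===== SOURCE B (Python) =====
-- from typing import List
--
--
-- def compute_rhyme_class(phonemes: List[str]) -> str:
--     """Right-to-left pass: accumulate the digit-stripped pieces of the
--     current suffix in reverse order; the moment a stressed phoneme appears,
--     join and return; remember the join at the first digit-bearing phoneme
--     as the fallback.  No index arithmetic, no slicing."""
--     pieces = []          # pieces of the joined suffix, in reverse order
--     digit_suffix = None
--     for p in reversed(phonemes):
--         clean = "".join(c for c in p if not c.isdigit())
--         if pieces:
--             pieces.append("_")
--         pieces.append(clean)
--         if "1" in p or "2" in p: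
--             return "".join(reversed(pieces))
--         if digit_suffix is None and any(c.isdigit() for c in p):
--             digit_suffix = "".join(reversed(pieces))
--     return digit_suffix if digit_suffix is not None else ""
-- ===== Notes on version B (the rewrite author's own statement) =====
-- stated objective: alternative
-- what changed: A finds the last stressed (or, failing that, last digit-bearing) index with two forward index scans and then slices, strips and joins; B never computes an index: a single right-to-left pass accumulates the digit-stripped pieces of the current suffix in reverse order, returns their join the moment a stressed phoneme is reached, and remembers the join at the first digit-bearing phoneme as the fallback.
import Mathlib
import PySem

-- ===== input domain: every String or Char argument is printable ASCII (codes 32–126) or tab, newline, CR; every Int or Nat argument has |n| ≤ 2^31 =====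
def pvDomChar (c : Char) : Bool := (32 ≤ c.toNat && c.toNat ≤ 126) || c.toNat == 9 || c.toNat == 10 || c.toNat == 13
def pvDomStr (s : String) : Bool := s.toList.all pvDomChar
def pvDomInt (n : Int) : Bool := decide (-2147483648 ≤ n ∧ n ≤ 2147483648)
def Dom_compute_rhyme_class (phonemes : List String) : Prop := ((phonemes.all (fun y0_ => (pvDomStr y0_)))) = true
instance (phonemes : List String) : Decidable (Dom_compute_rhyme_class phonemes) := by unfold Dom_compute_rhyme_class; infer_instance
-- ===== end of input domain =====

-- B replaces A's index-finding forward scans + slice/strip/join by a single right-to-left pass that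
-- accumulates the digit-stripped pieces of the suffix (no indices, no slicing); same return value ("alternative").

-- ===== PORT A =====
-- helpers: the elementary per-phoneme tests and the digit strip, shared wording of both Pythons
-- '"1" in p or "2" in p'
def pvHasStress (p : String) : Bool := PySem.Str.isIn "1" p || PySem.Str.isIn "2" p
-- 'any(c.isdigit() for c in p)'
def pvHasDigit (p : String) : Bool := p.toList.any PySem.Chars.isdigit
-- '"".join(c for c in p if not c.isdigit())'
def pvStrip (p : String) : String := String.ofList (p.toList.filter (fun c => !(PySem.Chars.isdigit c)))

def compute_rhyme_class (phonemes : List String) : String :=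
  if phonemes = [] then ""
  else
    -- first loop: keep the last index whose phoneme has a stress marker, starting from -1
    let idx1 : Int := (PySem.List.enumerate phonemes 0).foldl
      (fun acc ip => if pvHasStress ip.2 then ip.1 else acc) (-1)
    -- second loop, only run when idx1 < 0: keep the last index whose phoneme has any digit
    let idx2 : Int :=
      if idx1 < 0 then
        (PySem.List.enumerate phonemes 0).foldl
          (fun acc ip => if pvHasDigit ip.2 then ip.1 else acc) idx1
      else idx1
    if idx2 < 0 then ""
    else PySem.Str.join "_" ((PySem.List.slice phonemes (some idx2) none).map pvStrip)

-- ===== PORT B =====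
-- the loop of Source B: state (digit_suffix, pieces); iterates over reversed(phonemes);
-- 'break by return' on a stressed phoneme is the early-filled first component.
-- '"".join(reversed(pieces))' is PySem.Str.join "" pieces.reverse.
def pvLoop : List String → Option String × Option String × List String →
    Option String × Option String × List String
  | [], st => st
  | p :: rest, (s, d, pieces) =>
    let clean := pvStrip p
    let pieces2 := (if pieces = [] then pieces else pieces ++ ["_"]) ++ [clean]
    if pvHasStress p then (some (PySem.Str.join "" pieces2.reverse), d, pieces2)
    else pvLoop rest
      (s, (if d = none && pvHasDigit p then some (PySem.Str.join "" pieces2.reverse) else d), pieces2)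

def compute_rhyme_class_alt (phonemes : List String) : String :=
  let st := pvLoop phonemes.reverse (none, none, [])
  match st.1 with
  | some v => v
  | none => match st.2.1 with
    | some v => v
    | none => ""

-- ===== PRECONDITION & SPEC =====
def Spec_compute_rhyme_class (phonemes : List String) (out : String) : Prop := out = compute_rhyme_class_alt phonemes
instance (phonemes : List String) (out : String) : Decidable (Spec_compute_rhyme_class phonemes out) := by unfold Spec_compute_rhyme_class; infer_instance

-- ===== CLAIM (what is proved, stated in full; the proofs are below) =====
def Claim_equal_compute_rhyme_class : Prop := ∀ (phonemes : List String), Dom_compute_rhyme_class phonemes → Spec_compute_rhyme_class phonemes (compute_rhyme_class phonemes)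

-- ===== LEMMAS AND PROOFS =====

-- proof-only: the suffix of ps starting at the last element satisfying P (none if no such element)
def pvLastSuf (P : String → Bool) : List String → Option (List String)
  | [] => none
  | p :: rest =>
    match pvLastSuf P rest with
    | some s => some s
    | none => if P p then some (p :: rest) else none

-- proof-only: the digit-stripped '_'-joined rendering of a suffix (A's final expression)
def pvJS (l : List String) : String := PySem.Str.join "_" (l.map pvStrip)

lemma pvLastSuf_ne_nil (P : String → Bool) (ps : List String) (s : List String)
    (h : pvLastSuf P ps = some s) : s ≠ [] := by
  induction ps with
  | nil => simp [pvLastSuf] at h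
  | cons p rest ih =>
      rw [pvLastSuf] at h
      cases hr : pvLastSuf P rest with
      | some t => rw [hr] at h; exact ih (by rw [hr, ← h])
      | none =>
          rw [hr] at h
          by_cases hp : P p = true
          · simp [hp] at h; simp [← h]
          · simp only [Bool.not_eq_true] at hp; simp [hp] at h

-- A's keep-the-last forward fold is the first match of the reversed list
lemma pv_foldl_lastIdx (P : Int × String → Bool) (l : List (Int × String)) (a : Int) :
    l.foldl (fun acc ip => if P ip then ip.1 else acc) a
      = (match l.reverse.find? P with | some ip => ip.1 | none => a) := by
  induction l using List.reverseRecOn with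
  | nil => simp
  | append_singleton l x ih =>
      rw [List.foldl_append]
      simp only [List.foldl_cons, List.foldl_nil, List.reverse_append, List.reverse_cons,
        List.reverse_nil, List.nil_append, List.cons_append, List.find?_cons]
      by_cases h : P x = true
      · simp [h]
      · simp only [Bool.not_eq_true] at h
        simp [h, ih]

-- any index produced by enumerate … 0 is nonnegative
lemma pv_enum_fst_nonneg (phonemes : List String) (ip : Int × String)
    (h : ip ∈ (PySem.List.enumerate phonemes 0).reverse) : 0 ≤ ip.1 := by
  rw [List.mem_reverse] at h
  rw [PySem.List.mem_enumerate_iff] at h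
  obtain ⟨k, hk, rfl⟩ := h
  simp

lemma pv_enumerate_shift {α : Type} (l : List α) : ∀ (n : Int),
    PySem.List.enumerate l n = (PySem.List.enumerate l 0).map (fun ip => (ip.1 + n, ip.2)) := by
  induction l with
  | nil => intro n; simp [PySem.List.enumerate_nil]
  | cons x xs ih =>
      intro n
      rw [PySem.List.enumerate_cons, PySem.List.enumerate_cons, ih (n + 1), ih (0 + 1)]
      simp only [List.map_cons, List.map_map, zero_add]
      refine List.cons_eq_cons.mpr ⟨by simp, ?_⟩
      apply List.map_congr_left
      intro ip _
      simp only [Function.comp_apply]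
      refine Prod.ext ?_ rfl
      omega

-- find?-on-reversed-enumerate, rendered as the slice it selects, IS pvLastSuf
lemma pv_find_enum (P : String → Bool) : ∀ (ps : List String),
    (((PySem.List.enumerate ps 0).reverse.find? (fun ip => P ip.2)).map
        (fun ip => PySem.List.slice ps (some ip.1) none)) = pvLastSuf P ps := by
  intro ps
  induction ps with
  | nil => simp [PySem.List.enumerate_nil, pvLastSuf]
  | cons p rest ih =>
      rw [PySem.List.enumerate_cons]
      simp only [zero_add]
      rw [pv_enumerate_shift rest 1]
      simp only [List.reverse_cons]
      rw [List.find?_append]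
      rw [← List.map_reverse]
      rw [List.find?_map]
      cases hf : ((PySem.List.enumerate rest 0).reverse.find?
          (fun ip => P ip.2)) with
      | some ip =>
          have h0 : 0 ≤ ip.1 := pv_enum_fst_nonneg rest ip (List.mem_of_find?_eq_some hf)
          have hcomp : ((fun ip : Int × String => P ip.2) ∘ (fun ip : Int × String => (ip.1 + 1, ip.2)))
              = (fun ip : Int × String => P ip.2) := rfl
          rw [hcomp, hf]
          simp only [Option.some_or, Option.map_some, pvLastSuf]
          have hs : PySem.List.slice (p :: rest) (some (ip.1 + 1)) none
              = PySem.List.slice rest (some ip.1) none := by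
            rw [PySem.List.slice_from _ (by omega), PySem.List.slice_from _ h0]
            have : (ip.1 + 1).toNat = ip.1.toNat + 1 := by omega
            rw [this, List.drop_succ_cons]
          rw [hs]
          rw [hf] at ih
          simp only [Option.map_some] at ih
          rw [← ih]
      | none =>
          have hcomp : ((fun ip : Int × String => P ip.2) ∘ (fun ip : Int × String => (ip.1 + 1, ip.2)))
              = (fun ip : Int × String => P ip.2) := rfl
          rw [hcomp, hf]
          rw [hf] at ih
          simp only [Option.map_none] at ih
          simp only [Option.map_none, Option.none_or, List.find?_cons, pvLastSuf, ← ih]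
          by_cases hp : P p = true
          · simp only [hp]
            simp [PySem.List.slice_from (p :: rest) (show (0:Int) ≤ 0 by omega)]
          · simp only [Bool.not_eq_true] at hp
            simp [hp]

-- strings are equal iff their char lists are
lemma pv_str_ext (s t : String) (h : s.toList = t.toList) : s = t := by
  have h2 := congrArg String.ofList h
  rwa [String.ofList_toList, String.ofList_toList] at h2

-- the '_'-join of a cons, in B's incremental form
lemma pvJS_cons (p : String) (rest : List String) :
    pvJS (p :: rest) = if rest = [] then pvStrip p
      else String.ofList ((pvStrip p).toList ++ '_' :: (pvJS rest).toList) := by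
  apply pv_str_ext
  cases rest with
  | nil =>
      simp [pvJS, PySem.Str.toList_join, PySem.Chars.join_singleton]
  | cons q t =>
      have hne : (q :: t : List String) ≠ [] := by simp
      simp only [if_neg hne, pvJS, List.map_cons, PySem.Str.toList_join,
        PySem.Chars.join_cons_cons, String.toList_ofList]
      have hu : "_".toList = ['_'] := by decide
      rw [hu]
      simp

-- the break propagates: running the loop over l ++ m
lemma pvLoop_append (l : List String) : ∀ (m : List String) (d : Option String) (pieces : List String),
    pvLoop (l ++ m) (none, d, pieces)
      = (match (pvLoop l (none, d, pieces)).1 with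
         | some _ => pvLoop l (none, d, pieces)
         | none => pvLoop m (pvLoop l (none, d, pieces))) := by
  induction l with
  | nil => intro m d pieces; simp [pvLoop]
  | cons p l' ih =>
      intro m d pieces
      by_cases hp : pvHasStress p = true
      · simp [pvLoop, hp]
      · simp only [Bool.not_eq_true] at hp
        simp only [List.cons_append, pvLoop, hp, Bool.false_eq_true, if_false]
        exact ih m _ _

-- the pieces list B has accumulated after consuming the suffix ps (in reverse order)
def pvPieces : List String → List String
  | [] => []
  | p :: rest => (if pvPieces rest = [] then pvPieces rest else pvPieces rest ++ ["_"]) ++ [pvStrip p]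

lemma pvPieces_eq_nil_iff (ps : List String) : pvPieces ps = [] ↔ ps = [] := by
  cases ps with
  | nil => simp [pvPieces]
  | cons p rest => simp [pvPieces]

-- joining with the empty separator is concatenation
lemma pv_join_empty : ∀ (parts : List (List Char)), PySem.Chars.join [] parts = parts.flatten := by
  intro parts
  induction parts with
  | nil => simp [PySem.Chars.join_nil]
  | cons x xs ih =>
      cases xs with
      | nil => simp [PySem.Chars.join_singleton]
      | cons y t =>
          rw [PySem.Chars.join_cons_cons, ih]
          simp

-- the captured value '"".join(reversed(pieces))' is exactly A's final '_'-join of the suffix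
lemma pv_pieces_join : ∀ (ps : List String),
    PySem.Str.join "" (pvPieces ps).reverse = pvJS ps := by
  intro ps
  induction ps with
  | nil =>
      apply pv_str_ext
      simp [pvPieces, pvJS, PySem.Str.toList_join, PySem.Chars.join_nil]
  | cons p rest ih =>
      apply pv_str_ext
      rw [pvJS_cons]
      by_cases hr : rest = []
      · subst hr
        simp [pvPieces, PySem.Str.toList_join, PySem.Chars.join_singleton]
      · have hpn : pvPieces rest ≠ [] := by
          rw [ne_eq, pvPieces_eq_nil_iff]; exact hr
        simp only [pvPieces, if_neg hpn, if_neg hr]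
        have he : "".toList = ([] : List Char) := by decide
        rw [PySem.Str.toList_join, he, pv_join_empty, String.toList_ofList]
        have hrev : ((pvPieces rest ++ ["_"]) ++ [pvStrip p]).reverse
            = pvStrip p :: "_" :: (pvPieces rest).reverse := by simp
        rw [hrev]
        have hprev := congrArg String.toList ih
        rw [PySem.Str.toList_join, he, pv_join_empty] at hprev
        simp only [List.map_cons, List.flatten_cons]
        rw [hprev]
        have hu : "_".toList = ['_'] := by decide
        rw [hu]
        simp

-- the closed form of B's loop state after consuming all of ps (from the right)
def pvChar (ps : List String) : Option String × Option String × List String :=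
  match pvLastSuf pvHasStress ps with
  | some (q :: t) => (some (pvJS (q :: t)), (pvLastSuf pvHasDigit t).map pvJS, pvPieces (q :: t))
  | some [] => (none, none, [])      -- unreachable: pvLastSuf never returns some []
  | none => (none, (pvLastSuf pvHasDigit ps).map pvJS, pvPieces ps)

lemma pvLoop_char : ∀ (ps : List String), pvLoop ps.reverse (none, none, []) = pvChar ps := by
  intro ps
  induction ps with
  | nil => simp [pvLoop, pvChar, pvLastSuf, pvPieces]
  | cons p rest ih =>
      rw [List.reverse_cons, pvLoop_append rest.reverse [p], ih]
      cases hs : pvLastSuf pvHasStress rest with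
      | some s =>
          cases s with
          | nil => exact absurd hs.symm (fun h => pvLastSuf_ne_nil _ _ _ h.symm rfl)
          | cons q t =>
              simp only [pvChar, hs]
              have hps : pvLastSuf pvHasStress (p :: rest) = some (q :: t) := by
                rw [pvLastSuf, hs]
              rw [hps]
      | none =>
          simp only [pvChar, hs]
          -- state after rest: (none, D, pvPieces rest); now the loop runs on [p]
          have hpieces : ((if pvPieces rest = [] then pvPieces rest else pvPieces rest ++ ["_"])
              ++ [pvStrip p]) = pvPieces (p :: rest) := rfl
          have hcap : PySem.Str.join "" (pvPieces (p :: rest)).reverse = pvJS (p :: rest) :=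
            pv_pieces_join (p :: rest)
          by_cases hp : pvHasStress p = true
          · have hps : pvLastSuf pvHasStress (p :: rest) = some (p :: rest) := by
              rw [pvLastSuf, hs]; simp [hp]
            rw [hps]
            simp only [pvLoop, hp, if_true]
            rw [hpieces, hcap]
          · simp only [Bool.not_eq_true] at hp
            have hps : pvLastSuf pvHasStress (p :: rest) = none := by
              rw [pvLastSuf, hs]; simp [hp]
            rw [hps]
            simp only [pvLoop, hp, Bool.false_eq_true, if_false]
            rw [hpieces, hcap]
            have hpd : pvLastSuf pvHasDigit (p :: rest)
                = (match pvLastSuf pvHasDigit rest with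
                   | some s => some s
                   | none => if pvHasDigit p then some (p :: rest) else none) := rfl
            cases hd : pvLastSuf pvHasDigit rest with
            | some s =>
                rw [hpd, hd]
                simp
            | none =>
                rw [hpd, hd]
                by_cases hdp : pvHasDigit p = true
                · simp [hdp]
                · simp only [Bool.not_eq_true] at hdp
                  simp [hdp]

-- ===== VERDICT (by name: the statement is the Claim_ definition above) =====
theorem compute_rhyme_class_spec : Claim_equal_compute_rhyme_class := by
  intro phonemes _
  unfold Spec_compute_rhyme_class compute_rhyme_class compute_rhyme_class_alt
  rw [pvLoop_char]
  by_cases hnil : phonemes = []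
  · subst hnil
    simp [pvChar, pvLastSuf]
  · simp only [hnil, if_false]
    rw [pv_foldl_lastIdx, pv_foldl_lastIdx]
    cases hsf : (PySem.List.enumerate phonemes 0).reverse.find? (fun ip => pvHasStress ip.2) with
    | some ip =>
        have h0 : 0 ≤ ip.1 := pv_enum_fst_nonneg phonemes ip (List.mem_of_find?_eq_some hsf)
        have hmap := pv_find_enum pvHasStress phonemes
        rw [hsf] at hmap
        simp only [Option.map_some] at hmap
        have hnlt : ¬ (ip.1 < 0) := by omega
        simp only [hnlt, if_false]
        cases hls : pvLastSuf pvHasStress phonemes with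
        | none => rw [hls] at hmap; exact absurd hmap (by simp)
        | some s =>
            rw [hls] at hmap
            cases s with
            | nil => exact absurd hls.symm (fun h => pvLastSuf_ne_nil _ _ _ h.symm rfl)
            | cons q t =>
                simp only [pvChar, hls]
                simp only [Option.some.injEq] at hmap
                show pvJS (PySem.List.slice phonemes (some ip.1) none) = pvJS (q :: t)
                rw [hmap]
    | none =>
        have hmap := pv_find_enum pvHasStress phonemes
        rw [hsf] at hmap
        simp only [Option.map_none] at hmap
        simp only [show ((-1 : Int) < 0) = True by simp, if_true]
        cases hdf : (PySem.List.enumerate phonemes 0).reverse.find? (fun ip => pvHasDigit ip.2) with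
        | some ip =>
            have h0 : 0 ≤ ip.1 := pv_enum_fst_nonneg phonemes ip (List.mem_of_find?_eq_some hdf)
            have hmapd := pv_find_enum pvHasDigit phonemes
            rw [hdf] at hmapd
            simp only [Option.map_some] at hmapd
            have hnlt : ¬ (ip.1 < 0) := by omega
            simp only [hnlt, if_false]
            simp only [pvChar, ← hmap]
            rw [← hmapd]
            simp only [Option.map_some]
            rfl
        | none =>
            have hmapd := pv_find_enum pvHasDigit phonemes
            rw [hdf] at hmapd
            simp only [Option.map_none] at hmapd
            simp only [pvChar, ← hmap, ← hmapd]
            simp
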